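-- pv_equiv track=rewrite | github.com/isi-vista/adam | adam/curriculum/generate_segmentation_results.py | with_maximal_size
-- ===== SOURCE A (Python) =====
-- from typing import Any, Mapping, Sequence
--
-- def with_maximal_size(masks: Sequence[Sequence[Sequence[bool]]]) -> Sequence[int]:
--     """
--     Given some image masks, identify those with maximal size.
--
--     The size is the total number of pixels included in the mask, i.e. the number of True base
--     elements.
--
--     Parameters:
--         masks: A sequence of masks.
--
--     Returns:
--         A sequence of indices into :param:`masks`.
--     """
--     indices = []
--     max_pixels = 0
--     for idx, mask in enumerate(masks):
--         n_pixels_included = sum(sum(int(elem) for elem in row) for row in mask)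
--         if n_pixels_included == max_pixels:
--             indices.append(idx)
--         elif n_pixels_included > max_pixels:
--             max_pixels = n_pixels_included
--             indices = [idx]
--
--     return indices
-- ===== SOURCE B (Python) =====
-- def with_maximal_size(masks):
--     if not masks:
--         return []
--     sizes = [sum(sum(int(elem) for elem in row) for row in mask) for mask in masks]
--     m = max(sizes)
--     return [i for i, s in enumerate(sizes) if s == m]
-- ===== Notes on version B (the rewrite author's own statement) =====
-- stated objective: simpler
-- what changed: Replaces A's single-pass running-maximum with tie-list resetting by a two-pass scheme: build the list of per-mask sizes, take its max, and filter the indices attaining it (with an explicit empty-input guard).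
import Mathlib
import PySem

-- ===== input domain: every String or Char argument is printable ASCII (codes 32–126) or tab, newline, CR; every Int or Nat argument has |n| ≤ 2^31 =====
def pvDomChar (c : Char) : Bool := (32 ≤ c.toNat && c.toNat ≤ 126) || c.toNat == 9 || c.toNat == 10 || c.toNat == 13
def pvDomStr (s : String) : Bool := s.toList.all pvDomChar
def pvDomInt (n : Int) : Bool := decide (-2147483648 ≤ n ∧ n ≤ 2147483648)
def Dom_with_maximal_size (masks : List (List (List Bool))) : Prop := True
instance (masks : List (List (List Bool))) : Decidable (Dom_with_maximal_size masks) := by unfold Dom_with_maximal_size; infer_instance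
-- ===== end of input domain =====

-- B replaces A's single-pass running-maximum with tie accumulation by a two-pass
-- build-sizes-then-filter-the-argmax decomposition (objective: simpler); same return value.


-- ===== PORT A =====
-- sum(int(elem) for elem in row)
def pvRowSum (row : List Bool) : Int :=
  row.foldl (fun s e => s + (if e then 1 else 0)) 0

-- sum(sum(int(elem) for elem in row) for row in mask)
def pvMaskSize (mask : List (List Bool)) : Int :=
  mask.foldl (fun s r => s + pvRowSum r) 0

-- the loop body of A: one enumerate step over state (indices, max_pixels)
def pvStepA (st : List Int × Int) (p : Int × List (List Bool)) : List Int × Int :=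
  let n := pvMaskSize p.2
  if n = st.2 then (st.1 ++ [p.1], st.2)
  else if n > st.2 then ([p.1], n)
  else st

def with_maximal_size (masks : List (List (List Bool))) : List Int :=
  ((PySem.List.enumerate masks 0).foldl pvStepA ([], 0)).1

-- ===== PORT B =====
def with_maximal_size_alt (masks : List (List (List Bool))) : List Int :=
  if masks = [] then []
  else
    let sizes := masks.map pvMaskSize
    match PySem.List.max? sizes (fun x => x) with
    | none => []        -- unreachable: sizes nonempty
    | some m => ((PySem.List.enumerate sizes 0).filter (fun p => p.2 = m)).map (·.1)

-- ===== PRECONDITION & SPEC =====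
def Spec_with_maximal_size (masks : List (List (List Bool))) (out : List Int) : Prop := out = with_maximal_size_alt masks
instance (masks : List (List (List Bool))) (out : List Int) : Decidable (Spec_with_maximal_size masks out) := by unfold Spec_with_maximal_size; infer_instance

-- ===== CLAIM (what is proved, stated in full; the proofs are below) =====
def Claim_equal_with_maximal_size : Prop := ∀ (masks : List (List (List Bool))), Dom_with_maximal_size masks → Spec_with_maximal_size masks (with_maximal_size masks)

-- ===== LEMMAS AND PROOFS =====

theorem pvRowSum_nonneg (row : List Bool) : 0 ≤ pvRowSum row := by
  unfold pvRowSum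
  suffices h : ∀ (s : Int), 0 ≤ s → 0 ≤ row.foldl (fun s e => s + (if e then 1 else 0)) s by
    exact h 0 le_rfl
  induction row with
  | nil => intro s hs; simpa using hs
  | cons x xs ih =>
    intro s hs
    simp only [List.foldl_cons]
    exact ih _ (by split <;> omega)

theorem pvMaskSize_nonneg (mask : List (List Bool)) : 0 ≤ pvMaskSize mask := by
  unfold pvMaskSize
  suffices h : ∀ (s : Int), 0 ≤ s → 0 ≤ mask.foldl (fun s r => s + pvRowSum r) s by
    exact h 0 le_rfl
  induction mask with
  | nil => intro s hs; simpa using hs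
  | cons r rs ih =>
    intro s hs
    simp only [List.foldl_cons]
    exact ih _ (by have := pvRowSum_nonneg r; omega)

-- running maximum of the sizes, seeded at M
def pvFoldMax (ms : List (List (List Bool))) (M : Int) : Int :=
  ms.foldl (fun a mask => max a (pvMaskSize mask)) M

theorem pvFoldMax_ge_seed (ms : List (List (List Bool))) (M : Int) : M ≤ pvFoldMax ms M := by
  induction ms generalizing M with
  | nil => simp [pvFoldMax]
  | cons x xs ih =>
    simp only [pvFoldMax, List.foldl_cons]
    exact le_trans (le_max_left _ _) (ih (max M (pvMaskSize x)))

theorem pvFoldMax_ge_mem (x : List (List Bool)) :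
    ∀ (ms : List (List (List Bool))) (M : Int), x ∈ ms → pvMaskSize x ≤ pvFoldMax ms M := by
  intro ms
  induction ms with
  | nil => intro M hx; cases hx
  | cons y ys ih =>
    intro M hx
    simp only [pvFoldMax, List.foldl_cons]
    rcases List.mem_cons.mp hx with h | h
    · subst h; exact le_trans (le_max_right _ _) (pvFoldMax_ge_seed ys _)
    · exact ih _ h

theorem pvFoldMax_le (b : Int) :
    ∀ (ms : List (List (List Bool))) (M : Int), M ≤ b → (∀ x ∈ ms, pvMaskSize x ≤ b) →
      pvFoldMax ms M ≤ b := by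
  intro ms
  induction ms with
  | nil => intro M hM _; simpa [pvFoldMax] using hM
  | cons y ys ih =>
    intro M hM h
    simp only [pvFoldMax, List.foldl_cons]
    exact ih _ (max_le hM (h y (List.mem_cons_self ..)))
      (fun x hx => h x (List.mem_cons_of_mem _ hx))

-- the indices (starting at k) of masks in ms whose size equals M
def pvPos (ms : List (List (List Bool))) (k M : Int) : List Int :=
  ((PySem.List.enumerate ms k).filter (fun p => pvMaskSize p.2 = M)).map (·.1)

theorem pvPos_cons (x : List (List Bool)) (xs : List (List (List Bool))) (k M : Int) :
    pvPos (x :: xs) k M =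
      (if pvMaskSize x = M then [k] else []) ++ pvPos xs (k + 1) M := by
  by_cases h : pvMaskSize x = M <;>
    simp [pvPos, PySem.List.enumerate_cons, h]

-- characterisation of A's loop from an arbitrary state
theorem loopA (ms : List (List (List Bool))) (k : Int) (I : List Int) (M : Int) :
    (PySem.List.enumerate ms k).foldl pvStepA (I, M)
    = ((if M = pvFoldMax ms M then I else []) ++ pvPos ms k (pvFoldMax ms M),
        pvFoldMax ms M) := by
  induction ms generalizing k I M with
  | nil => simp [pvFoldMax, pvPos, PySem.List.enumerate]
  | cons x xs ih =>
    have hMax : pvFoldMax (x :: xs) M = pvFoldMax xs (max M (pvMaskSize x)) := by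
      simp [pvFoldMax]
    rw [PySem.List.enumerate_cons, List.foldl_cons, pvPos_cons, hMax]
    by_cases h1 : pvMaskSize x = M
    · have hstep : pvStepA (I, M) (k, x) = (I ++ [k], M) := by
        simp [pvStepA, h1]
      have hm : max M (pvMaskSize x) = M := by omega
      rw [hstep, ih (k + 1) (I ++ [k]) M, hm]
      by_cases h2 : M = pvFoldMax xs M
      · simp [← h2, h1]
      · have hlt : M < pvFoldMax xs M :=
          lt_of_le_of_ne (pvFoldMax_ge_seed xs M) h2
        have hne : pvMaskSize x ≠ pvFoldMax xs M := by omega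
        simp [h2, hne]
    · by_cases h2 : pvMaskSize x > M
      · have hstep : pvStepA (I, M) (k, x) = ([k], pvMaskSize x) := by
          simp [pvStepA, h1, h2]
        have hm : max M (pvMaskSize x) = pvMaskSize x := by omega
        rw [hstep, ih (k + 1) [k] (pvMaskSize x), hm]
        have hge : pvMaskSize x ≤ pvFoldMax xs (pvMaskSize x) := pvFoldMax_ge_seed xs _
        have hMne : M ≠ pvFoldMax xs (pvMaskSize x) := by omega
        simp only [if_neg hMne]
        by_cases h3 : pvMaskSize x = pvFoldMax xs (pvMaskSize x)
        · simp [← h3]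
        · simp [h3]
      · have h3 : pvMaskSize x < M := by omega
        have hstep : pvStepA (I, M) (k, x) = (I, M) := by
          simp [pvStepA, h1]; omega
        have hm : max M (pvMaskSize x) = M := by omega
        rw [hstep, ih (k + 1) I M, hm]
        have hne : pvMaskSize x ≠ pvFoldMax xs M := by
          have := pvFoldMax_ge_seed xs M; omega
        simp [hne]

theorem enumerate_map (f : List (List Bool) → Int) (ms : List (List (List Bool))) (k : Int) :
    PySem.List.enumerate (ms.map f) k = (PySem.List.enumerate ms k).map (fun p => (p.1, f p.2)) := by
  induction ms generalizing k with
  | nil => simp [PySem.List.enumerate]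
  | cons x xs ih => simp [PySem.List.enumerate_cons, ih]

-- ===== VERDICT (by name: the statement is the Claim_ definition above) =====
theorem with_maximal_size_spec : Claim_equal_with_maximal_size := by
  intro masks _
  unfold Spec_with_maximal_size with_maximal_size with_maximal_size_alt
  rw [loopA masks 0 [] 0]
  by_cases hnil : masks = []
  · subst hnil; simp [pvFoldMax, pvPos, PySem.List.enumerate]
  · simp only [if_neg hnil]
    have hsz : masks.map pvMaskSize ≠ [] := by simpa using hnil
    obtain ⟨m, hm⟩ : ∃ m, PySem.List.max? (masks.map pvMaskSize) (fun x => x) = some m := by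
      cases h : PySem.List.max? (masks.map pvMaskSize) (fun x => x) with
      | none => exact absurd ((PySem.List.max?_eq_none_iff _ _).mp h) hsz
      | some m => exact ⟨m, rfl⟩
    rw [hm]
    have hmem : m ∈ masks.map pvMaskSize := PySem.List.max?_mem hm
    obtain ⟨x, hx, hxm⟩ := List.mem_map.mp hmem
    have hbound : ∀ y ∈ masks.map pvMaskSize, y ≤ m := by
      intro y hy; exact PySem.List.max?_isMax hm y hy
    have hmF : pvFoldMax masks 0 = m := by
      apply le_antisymm
      · exact pvFoldMax_le m masks 0 (hxm ▸ pvMaskSize_nonneg x)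
          (fun z hz => hbound _ (List.mem_map_of_mem hz))
      · exact hxm ▸ pvFoldMax_ge_mem x masks 0 hx
    have : (if (0 : Int) = pvFoldMax masks 0 then ([] : List Int) else []) = [] := by
      split <;> rfl
    rw [this, List.nil_append, hmF]
    -- pvPos masks 0 m = filtered indices over sizes
    unfold pvPos
    rw [enumerate_map pvMaskSize masks 0]
    simp [List.filter_map, List.map_map, Function.comp_def]
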